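-- pv_equiv track=rewrite | github.com/VenkateshSrini/tfbot | terraform_question_manager.py | _infer_s3_configs
-- ===== SOURCE A (Python) =====
-- from typing import Dict, List
--
-- def _infer_s3_configs(answers: Dict[str, str]) -> Dict[str, str]:
--     """Infer S3-related configurations"""
--     inferred = {}
--
--     for key, value in answers.items():
--         value_lower = value.lower()
--
--         # Infer storage class
--         if any(term in value_lower for term in ['archive', 'backup', 'long term']):
--             inferred['s3_suggested_storage_class'] = 'GLACIER'
--         elif any(term in value_lower for term in ['frequent', 'active']):
--             inferred['s3_suggested_storage_class'] = 'STANDARD'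
--         else:
--             inferred['s3_suggested_storage_class'] = 'STANDARD_IA'
--
--         # Infer versioning
--         if any(term in value_lower for term in ['important', 'critical', 'production']):
--             inferred['s3_enable_versioning'] = 'true'
--
--     return inferred
-- ===== SOURCE B (Python) =====
-- from typing import Dict, List
--
-- _VERSIONING_TERMS = ('important', 'critical', 'production')
--
--
-- def _storage_class(value_lower: str) -> str:
--     if any(term in value_lower for term in ('archive', 'backup', 'long term')):
--         return 'GLACIER'
--     if any(term in value_lower for term in ('frequent', 'active')):
--         return 'STANDARD'
--     return 'STANDARD_IA'
--
--
-- def _infer_s3_configs(answers: Dict[str, str]) -> Dict[str, str]: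
--     """Infer S3-related configurations"""
--     if not answers:
--         return {}
--     values = [v.lower() for v in answers.values()]
--     inferred = {'s3_suggested_storage_class': _storage_class(values[-1])}
--     if any(term in v for v in values for term in _VERSIONING_TERMS):
--         inferred['s3_enable_versioning'] = 'true'
--     return inferred
-- ===== Notes on version B (the rewrite author's own statement) =====
-- stated objective: simpler
-- what changed: Replaces the dict-overwriting loop with two direct computations: the storage class once from the last value (the only one A's overwrite keeps) and the versioning flag as a single any() over all values, skipping per-item dict writes and the storage-class cascade on all but the last item.
import Mathlib
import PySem

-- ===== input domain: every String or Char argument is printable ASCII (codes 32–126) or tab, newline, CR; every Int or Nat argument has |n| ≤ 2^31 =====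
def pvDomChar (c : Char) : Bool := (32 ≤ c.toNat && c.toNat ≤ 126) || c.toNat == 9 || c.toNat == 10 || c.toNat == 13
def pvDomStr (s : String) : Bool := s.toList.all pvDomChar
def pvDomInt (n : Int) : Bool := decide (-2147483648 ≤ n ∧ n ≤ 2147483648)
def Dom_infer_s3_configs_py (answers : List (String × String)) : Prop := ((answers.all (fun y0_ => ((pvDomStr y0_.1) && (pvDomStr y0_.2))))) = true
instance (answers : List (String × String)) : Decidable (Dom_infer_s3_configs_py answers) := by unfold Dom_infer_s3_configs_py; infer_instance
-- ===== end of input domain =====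

-- B computes the storage class once from the last value (the only one A's overwriting loop keeps)
-- and the versioning flag with a single any() over all values, instead of A's dict-mutating loop: simpler.

-- ===== PORT A =====
def pvAStep (inferred : PySem.Dict String String) (kv : String × String) : PySem.Dict String String :=
  let value_lower := PySem.Str.lower kv.2
  let inferred :=
    if ["archive", "backup", "long term"].any (fun term => PySem.Str.isIn term value_lower) then
      inferred.insert "s3_suggested_storage_class" "GLACIER"
    else if ["frequent", "active"].any (fun term => PySem.Str.isIn term value_lower) then
      inferred.insert "s3_suggested_storage_class" "STANDARD"
    else
      inferred.insert "s3_suggested_storage_class" "STANDARD_IA"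
  if ["important", "critical", "production"].any (fun term => PySem.Str.isIn term value_lower) then
    inferred.insert "s3_enable_versioning" "true"
  else
    inferred

def infer_s3_configs_py (answers : List (String × String)) : List (String × String) :=
  (answers.foldl pvAStep PySem.Dict.empty).items

-- ===== PORT B =====
def pvStorageClass (value_lower : String) : String :=
  if ["archive", "backup", "long term"].any (fun term => PySem.Str.isIn term value_lower) then
    "GLACIER"
  else if ["frequent", "active"].any (fun term => PySem.Str.isIn term value_lower) then
    "STANDARD"
  else
    "STANDARD_IA"

def infer_s3_configs_py_alt (answers : List (String × String)) : List (String × String) :=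
  if answers.isEmpty then []
  else
    let values := answers.map (fun kv => PySem.Str.lower kv.2)
    let inferred := [("s3_suggested_storage_class", pvStorageClass (values.getLast?.getD ""))]
    if values.any (fun v => ["important", "critical", "production"].any (fun term => PySem.Str.isIn term v)) then
      inferred ++ [("s3_enable_versioning", "true")]
    else
      inferred

-- ===== PRECONDITION & SPEC =====
def Spec_infer_s3_configs_py (answers : List (String × String)) (out : List (String × String)) : Prop := out = infer_s3_configs_py_alt answers
instance (answers : List (String × String)) (out : List (String × String)) : Decidable (Spec_infer_s3_configs_py answers out) := by unfold Spec_infer_s3_configs_py; infer_instance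

-- ===== CLAIM (what is proved, stated in full; the proofs are below) =====
def Claim_equal_infer_s3_configs_py : Prop := ∀ (answers : List (String × String)), Dom_infer_s3_configs_py answers → Spec_infer_s3_configs_py answers (infer_s3_configs_py answers)

-- ===== LEMMAS AND PROOFS =====

-- canonical shape of A's dict state after at least one iteration
def pvCanon (cls : String) (vers : Bool) : PySem.Dict String String :=
  PySem.Dict.mk (("s3_suggested_storage_class", cls) :: if vers then [("s3_enable_versioning", "true")] else [])

def pvVersMatch (kv : String × String) : Bool :=
  ["important", "critical", "production"].any (fun term => PySem.Str.isIn term (PySem.Str.lower kv.2))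

theorem pvAStep_canon (cls : String) (vers : Bool) (kv : String × String) :
    pvAStep (pvCanon cls vers) kv =
      pvCanon (pvStorageClass (PySem.Str.lower kv.2)) (vers || pvVersMatch kv) := by
  simp only [pvAStep, pvStorageClass, pvVersMatch, pvCanon]
  cases vers <;> split_ifs <;>
    simp_all [PySem.Dict.insert, PySem.Dict.contains]

theorem pvAStep_empty (kv : String × String) :
    pvAStep PySem.Dict.empty kv =
      pvCanon (pvStorageClass (PySem.Str.lower kv.2)) (pvVersMatch kv) := by
  simp only [pvAStep, pvStorageClass, pvVersMatch, pvCanon]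
  split_ifs <;>
    simp_all [PySem.Dict.insert, PySem.Dict.contains, PySem.Dict.empty]

theorem pvFoldl_canon (l : List (String × String)) (cls : String) (vers : Bool) :
    l.foldl pvAStep (pvCanon cls vers) =
      pvCanon (l.getLast?.elim cls (fun kv => pvStorageClass (PySem.Str.lower kv.2)))
        (vers || l.any pvVersMatch) := by
  induction l generalizing cls vers with
  | nil => simp
  | cons x t ih =>
      simp only [List.foldl_cons, pvAStep_canon, ih, List.any_cons]
      rw [Bool.or_assoc]
      cases t with
      | nil => simp
      | cons y u =>
          cases hl : (y :: u).getLast? with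
          | none => simp at hl
          | some kv => simp [List.getLast?_cons_cons, hl]

-- ===== VERDICT (by name: the statement is the Claim_ definition above) =====
theorem infer_s3_configs_py_spec : Claim_equal_infer_s3_configs_py := by
  intro answers _
  unfold Spec_infer_s3_configs_py infer_s3_configs_py infer_s3_configs_py_alt
  cases answers with
  | nil => simp [PySem.Dict.empty]
  | cons x t =>
      rw [List.foldl_cons, pvAStep_empty, pvFoldl_canon]
      cases hkv : (x :: t).getLast? with
      | none => simp at hkv
      | some kv =>
          have hlast : t.getLast?.elim (pvStorageClass (PySem.Str.lower x.2))
              (fun kv => pvStorageClass (PySem.Str.lower kv.2)) = pvStorageClass (PySem.Str.lower kv.2) := by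
            cases t with
            | nil => simp only [List.getLast?_singleton, Option.some.injEq] at hkv; rw [hkv]; rfl
            | cons y u => rw [List.getLast?_cons_cons] at hkv; rw [hkv]; rfl
          have hmap : (List.map (fun kv => PySem.Str.lower kv.2) (x :: t)).getLast?
              = some (PySem.Str.lower kv.2) := by
            rw [List.getLast?_map, hkv, Option.map_some]
          have hcond : ((x :: t).map (fun kv => PySem.Str.lower kv.2)).any
              (fun v => ["important", "critical", "production"].any (fun term => PySem.Str.isIn term v))
              = (pvVersMatch x || t.any pvVersMatch) := by
            rw [List.any_map, List.any_cons]; rfl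
          simp only [List.map_cons] at hmap hcond
          simp only [hlast, List.isEmpty_cons, Bool.false_eq_true, if_false, List.map_cons,
            hmap, hcond, Option.getD_some, pvCanon]
          split <;> rfl
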